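-- pv_equiv track=rewrite | github.com/Aasthaengg/IBMdataset | Python_codes/p03213/s401944680.py | solve
-- ===== SOURCE A (Python) =====
-- def solve(N):
--     if N <= 1:
--         return 0
--     primes = [
--         2, 3, 5, 7, 11,
--         13, 17, 19, 23, 29,
--         31, 37, 41, 43, 47,
--         53, 59, 61, 67, 71,
--         73, 79, 83, 89, 97,
--     ]
--     primes = [p for p in primes if p <= N]
--     exps = [0] * len(primes)
--     for i in range(len(primes)):
--         p = primes[i]
--         pi = p
--         while pi <= N:
--             exps[i] += N // pi
--             pi *= p
--
--     ans = 0
--     for i in range(len(exps)):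
--         a = exps[i]
--
--         if 74 <= a:  # 75
--             ans += 1
--
--         for j in range(i + 1, len(exps)):
--             b = exps[j]
--
--             if 24 <= a and 2 <= b:  # 25*3
--                 ans += 1
--             if 24 <= b:  # 3*25
--                 ans += 1
--
--             if 14 <= a and 4 <= b:  # 15*5
--                 ans += 1
--             if 14 <= b:  # 5*15
--                 ans += 1
--
--             for k in range(j + 1, len(exps)):
--                 c = exps[k]
--
--                 if 4 <= c:  # 3*5*5 or 5*3*3
--                     ans += 2
--                 if 4 <= b and 2 <= c:  # 5*5*3
--                     ans += 1
--
--     return ans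
-- ===== SOURCE B (Python) =====
-- def solve(N):
--     if N <= 1:
--         return 0
--     primes = [
--         2, 3, 5, 7, 11,
--         13, 17, 19, 23, 29,
--         31, 37, 41, 43, 47,
--         53, 59, 61, 67, 71,
--         73, 79, 83, 89, 97,
--     ]
--     exps = []
--     for p in primes:
--         if p <= N:
--             e = 0
--             pk = p
--             while pk <= N:
--                 e += N // pk
--                 pk *= p
--             exps.append(e)
--     c2 = sum(1 for e in exps if e >= 2)
--     c4 = sum(1 for e in exps if e >= 4)
--     c14 = sum(1 for e in exps if e >= 14)
--     c24 = sum(1 for e in exps if e >= 24)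
--     c74 = sum(1 for e in exps if e >= 74)
--     return c74 + c24 * (c2 - 1) + c14 * (c4 - 1) + c4 * (c4 - 1) // 2 * (c2 - 2)
-- ===== Notes on version B (the rewrite author's own statement) =====
-- stated objective: simpler
-- what changed: Replaces A's triple-nested scan over the prime-exponent list by five threshold counts (entries >= 2, 4, 14, 24, 74) combined in a closed-form combinatorial sum; the Legendre exponent computation is kept.
import Mathlib
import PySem

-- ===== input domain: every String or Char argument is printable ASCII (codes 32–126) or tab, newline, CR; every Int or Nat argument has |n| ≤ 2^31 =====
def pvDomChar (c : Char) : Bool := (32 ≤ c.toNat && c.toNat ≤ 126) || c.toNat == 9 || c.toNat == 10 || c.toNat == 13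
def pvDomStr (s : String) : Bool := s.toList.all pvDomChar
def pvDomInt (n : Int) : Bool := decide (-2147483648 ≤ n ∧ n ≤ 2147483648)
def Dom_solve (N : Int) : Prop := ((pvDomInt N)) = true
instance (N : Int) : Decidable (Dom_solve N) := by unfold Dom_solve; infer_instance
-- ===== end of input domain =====

-- B replaces A's triple-nested scan over the exponent list by five threshold counts and a
-- closed-form combinatorial sum (objective: simpler/faster counting step); Legendre exponents kept.

-- shared helper: the Python `while pi <= N: exp += N // pi; pi *= p` loop, ported with fuel
-- (64 iterations always suffice on the domain |N| ≤ 2^31 since pi at least doubles each step)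
def legLoop (N p : Int) : Nat → Int → Int → Int
  | 0, e, _ => e
  | f + 1, e, pi => if pi ≤ N then legLoop N p f (e + PySem.Int.floordiv N pi) (pi * p) else e

def primesList : List Int :=
  [2, 3, 5, 7, 11, 13, 17, 19, 23, 29, 31, 37, 41, 43, 47,
   53, 59, 61, 67, 71, 73, 79, 83, 89, 97]

-- ===== PORT A =====
-- A's index loops `for j in range(i+1, …)` / `for k in range(j+1, …)` are ported as the
-- obvious structural recursions over the corresponding tails of `exps`.
def pairTerm (a b : Int) : Int :=
  (if 24 ≤ a ∧ 2 ≤ b then 1 else 0) + (if 24 ≤ b then 1 else 0)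
    + (if 14 ≤ a ∧ 4 ≤ b then 1 else 0) + (if 14 ≤ b then 1 else 0)

def loopK (b : Int) : List Int → Int
  | [] => 0
  | c :: t => (if 4 ≤ c then 2 else 0) + (if 4 ≤ b ∧ 2 ≤ c then 1 else 0) + loopK b t

def loopJ (a : Int) : List Int → Int
  | [] => 0
  | b :: t => pairTerm a b + loopK b t + loopJ a t

def loopI : List Int → Int
  | [] => 0
  | a :: t => (if 74 ≤ a then 1 else 0) + loopJ a t + loopI t

def solve (N : Int) : Int :=
  if N ≤ 1 then 0
  else
    let primes := primesList.filter (fun p => decide (p ≤ N))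
    let exps := primes.map (fun p => legLoop N p 64 0 p)
    loopI exps

-- ===== PORT B =====
-- cnt t l = number of entries ≥ t (Python: sum(1 for e in exps if e >= t))
def cnt (t : Int) (l : List Int) : Int := (l.countP (fun e => decide (t ≤ e)) : Int)

def solve_alt (N : Int) : Int :=
  if N ≤ 1 then 0
  else
    let exps := (primesList.filter (fun p => decide (p ≤ N))).map (fun p => legLoop N p 64 0 p)
    let c2 := cnt 2 exps
    let c4 := cnt 4 exps
    let c14 := cnt 14 exps
    let c24 := cnt 24 exps
    let c74 := cnt 74 exps
    c74 + c24 * (c2 - 1) + c14 * (c4 - 1) + PySem.Int.floordiv (c4 * (c4 - 1)) 2 * (c2 - 2)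

-- ===== PRECONDITION & SPEC =====
def Spec_solve (N : Int) (out : Int) : Prop := out = solve_alt N
instance (N : Int) (out : Int) : Decidable (Spec_solve N out) := by unfold Spec_solve; infer_instance

-- ===== CLAIM (what is proved, stated in full; the proofs are below) =====
def Claim_equal_solve : Prop := ∀ (N : Int), Dom_solve N → Spec_solve N (solve N)

-- ===== LEMMAS AND PROOFS =====

def T (m : Int) : Int := PySem.Int.floordiv (m * (m - 1)) 2

theorem T_succ (m : Int) : T (m + 1) = T m + m := by
  unfold T
  have h : (m + 1) * (m + 1 - 1) = m * (m - 1) + m * 2 := by ring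
  rw [h, PySem.Int.floordiv_eq_ediv_of_pos (by norm_num),
      PySem.Int.floordiv_eq_ediv_of_pos (by norm_num), Int.add_mul_ediv_right _ _ (by norm_num)]

theorem T_zero : T 0 = 0 := by decide

theorem cnt_cons (t a : Int) (l : List Int) :
    cnt t (a :: l) = cnt t l + (if t ≤ a then 1 else 0) := by
  simp only [cnt, List.countP_cons]
  by_cases h : t ≤ a <;> simp [h]

theorem cnt_eq_zero (t a : Int) (l : List Int) (h : ∀ b ∈ l, b ≤ a) (ha : a < t) :
    cnt t l = 0 := by
  simp only [cnt]
  norm_cast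
  rw [List.countP_eq_zero]
  intro b hb
  simp only [decide_eq_true_eq]
  have := h b hb
  omega

theorem loopK_eq (b : Int) (t : List Int) :
    loopK b t = 2 * cnt 4 t + (if 4 ≤ b then 1 else 0) * cnt 2 t := by
  induction t with
  | nil => simp [loopK, cnt]
  | cons c t ih =>
    simp only [loopK, ih, cnt_cons]
    split_ifs <;> ring_nf <;> omega

def Ppairs : List Int → Int
  | [] => 0
  | b :: t => loopK b t + Ppairs t

theorem loopJ_eq (a : Int) (t : List Int) :
    loopJ a t = (if 24 ≤ a then 1 else 0) * cnt 2 t + cnt 24 t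
      + (if 14 ≤ a then 1 else 0) * cnt 4 t + cnt 14 t + Ppairs t := by
  induction t with
  | nil => simp [loopJ, cnt, Ppairs]
  | cons b t ih =>
    simp only [loopJ, ih, cnt_cons, Ppairs, pairTerm]
    split_ifs <;> omega

theorem Ppairs_eq (t : List Int) (hs : t.Pairwise (fun x y => y ≤ x)) :
    Ppairs t = T (cnt 4 t) + cnt 4 t * (cnt 2 t - 1) := by
  induction t with
  | nil => simp [Ppairs, cnt, T_zero]
  | cons b t ih =>
    rcases List.pairwise_cons.mp hs with ⟨hb, ht⟩
    simp only [Ppairs, loopK_eq, ih ht, cnt_cons]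
    by_cases h4 : 4 ≤ b
    · have h2 : 2 ≤ b := by omega
      rw [if_pos h4, if_pos h2, T_succ]
      ring
    · have hc4 : cnt 4 t = 0 := cnt_eq_zero 4 b t hb (by omega)
      rw [if_neg h4, hc4]
      simp [T_zero]

theorem loopI_eq (l : List Int) (hs : l.Pairwise (fun x y => y ≤ x)) :
    loopI l = cnt 74 l + cnt 24 l * (cnt 2 l - 1) + cnt 14 l * (cnt 4 l - 1)
      + T (cnt 4 l) * (cnt 2 l - 2) := by
  induction l with
  | nil => simp [loopI, cnt, T_zero]
  | cons a t ih =>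
    rcases List.pairwise_cons.mp hs with ⟨ha, ht⟩
    simp only [loopI, loopJ_eq, Ppairs_eq t ht, ih ht, cnt_cons]
    by_cases h74 : 74 ≤ a
    · rw [if_pos h74, if_pos (by omega : (24:Int) ≤ a), if_pos (by omega : (14:Int) ≤ a),
          if_pos (by omega : (4:Int) ≤ a), if_pos (by omega : (2:Int) ≤ a), T_succ]
      ring
    · rw [if_neg h74]
      by_cases h24 : 24 ≤ a
      · rw [if_pos h24, if_pos (by omega : (14:Int) ≤ a),
            if_pos (by omega : (4:Int) ≤ a), if_pos (by omega : (2:Int) ≤ a), T_succ]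
        ring
      · rw [if_neg h24]
        by_cases h14 : 14 ≤ a
        · rw [if_pos h14, if_pos (by omega : (4:Int) ≤ a), if_pos (by omega : (2:Int) ≤ a),
              T_succ]
          ring
        · rw [if_neg h14, cnt_eq_zero 14 a t ha (by omega)]
          by_cases h4 : 4 ≤ a
          · rw [if_pos h4, if_pos (by omega : (2:Int) ≤ a), T_succ]
            ring
          · rw [if_neg h4, cnt_eq_zero 4 a t ha (by omega)]
            by_cases h2 : 2 ≤ a
            · rw [if_pos h2]
              simp only [add_zero, mul_zero, zero_mul, T_zero]
              ring
            · rw [if_neg h2, cnt_eq_zero 24 a t ha (by omega),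
                  cnt_eq_zero 74 a t ha (by omega), cnt_eq_zero 2 a t ha (by omega)]
              simp only [add_zero, mul_zero, zero_mul, T_zero]

theorem floordiv_anti (a x y : Int) (ha : 0 ≤ a) (hx : 0 < x) (hxy : x ≤ y) :
    PySem.Int.floordiv a y ≤ PySem.Int.floordiv a x := by
  rw [PySem.Int.floordiv_eq_ediv_of_pos (by omega), PySem.Int.floordiv_eq_ediv_of_pos hx]
  have h0 : 0 ≤ a / y := Int.ediv_nonneg ha (by omega)
  rw [Int.le_ediv_iff_mul_le hx]
  calc a / y * x ≤ a / y * y := by nlinarith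
    _ ≤ a := Int.ediv_mul_le a (by omega)

theorem legLoop_ge (f : Nat) (N p x e : Int) (hN : 0 ≤ N) (hp : 1 ≤ p) (hx : 1 ≤ x) :
    e ≤ legLoop N p f e x := by
  induction f generalizing e x with
  | zero => simp [legLoop]
  | succ f ih =>
    simp only [legLoop]
    split_ifs with h
    · calc e ≤ e + PySem.Int.floordiv N x := by
            rw [PySem.Int.floordiv_eq_ediv_of_pos (by omega)]
            have := Int.ediv_nonneg hN (by omega : (0:Int) ≤ x)
            omega
        _ ≤ _ := ih _ _ (by nlinarith)
    · exact le_refl e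

theorem legLoop_mono (f : Nat) (N p q x y e1 e2 : Int) (hN : 0 ≤ N) (hp : 1 ≤ p)
    (hpq : p ≤ q) (hx : 1 ≤ x) (hxy : x ≤ y) (he : e1 ≤ e2) :
    legLoop N q f e1 y ≤ legLoop N p f e2 x := by
  induction f generalizing x y e1 e2 with
  | zero => simpa [legLoop]
  | succ f ih =>
    simp only [legLoop]
    split_ifs with hy hx'
    · exact ih _ _ _ _ (by nlinarith) (by nlinarith)
        (by have := floordiv_anti N x y hN (by omega) hxy; omega)
    · omega
    · have hfd : 0 ≤ PySem.Int.floordiv N x := by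
        rw [PySem.Int.floordiv_eq_ediv_of_pos (by omega)]
        exact Int.ediv_nonneg hN (by omega)
      have hg := legLoop_ge f N p (x * p) (e2 + PySem.Int.floordiv N x) hN hp (by nlinarith)
      omega
    · exact he

theorem exps_sorted (N : Int) (hN : 0 ≤ N) :
    ((primesList.filter (fun p => decide (p ≤ N))).map
        (fun p => legLoop N p 64 0 p)).Pairwise (fun x y => y ≤ x) := by
  rw [List.pairwise_map]
  have hps : (primesList.filter (fun p => decide (p ≤ N))).Pairwise (· ≤ ·) :=
    List.Pairwise.filter _ (by decide : primesList.Pairwise (· ≤ ·))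
  refine hps.imp_of_mem ?_
  intro p q hpmem hqmem hpq
  have hp2 : 2 ≤ p := by
    have hm := List.mem_of_mem_filter hpmem
    fin_cases hm <;> norm_num
  exact legLoop_mono 64 N p q p q 0 0 hN (by omega) hpq (by omega) hpq le_rfl

-- ===== VERDICT (by name: the statement is the Claim_ definition above) =====
theorem solve_spec : Claim_equal_solve := by
  intro N _
  unfold Spec_solve solve solve_alt
  by_cases h : N ≤ 1
  · simp [h]
  · simp only [if_neg h]
    have hs := exps_sorted N (by omega)
    have := loopI_eq _ hs
    simpa [T] using this
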